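-- pv_equiv track=rewrite | github.com/ncalavera/improv_ucb | archive/src/chapter_formatter.py | _drop_spurious_blank_lines
-- ===== SOURCE A (Python) =====
-- from typing import Dict, Iterable, List, Optional
--
-- def _drop_spurious_blank_lines(lines: List[str]) -> List[str]:
--     compact: List[str] = []
--     for idx, line in enumerate(lines):
--         if line.strip():
--             compact.append(line)
--             continue
--
--         prev = _find_neighbor(lines, idx, direction=-1)
--         nxt = _find_neighbor(lines, idx, direction=1)
--         if (
--             prev
--             and nxt
--             and not prev.strip().startswith(("#", "-", "###"))
--             and not nxt.strip().startswith(("#", "-"))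
--             and nxt.strip()
--             and nxt.strip()[0].islower()
--         ):
--             continue
--
--         compact.append("")
--     return compact
--
-- def _find_neighbor(lines: List[str], start: int, direction: int) -> Optional[str]:
--     idx = start + direction
--     while 0 <= idx < len(lines):
--         candidate = lines[idx]
--         if candidate.strip():
--             return candidate
--         idx += direction
--     return None
-- ===== SOURCE B (Python) =====
-- from typing import List
--
--
-- def _drop_spurious_blank_lines(lines: List[str]) -> List[str]:
--     n = len(lines)
--     # nearest non-blank line before each index (one forward scan)
--     prev_nb: List = [None] * n
--     last = None
--     for i in range(n):
--         prev_nb[i] = last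
--         if lines[i].strip():
--             last = lines[i]
--     # nearest non-blank line after each index (one backward scan)
--     next_nb: List = [None] * n
--     last = None
--     for i in range(n - 1, -1, -1):
--         next_nb[i] = last
--         if lines[i].strip():
--             last = lines[i]
--     out: List[str] = []
--     for line, p, q in zip(lines, prev_nb, next_nb):
--         if line.strip():
--             out.append(line)
--         elif (
--             p is not None
--             and q is not None
--             and not p.strip().startswith(("#", "-"))
--             and not q.strip().startswith(("#", "-"))
--             and q.strip()[0].islower()
--         ):
--             continue
--         else:
--             out.append("")
--     return out
-- ===== Notes on version B (the rewrite author's own statement) =====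
-- stated objective: alternative
-- what changed: A rescans the list in both directions from every blank line to find its non-blank neighbours (quadratic on long blank runs); B precomputes nearest non-blank previous/next lines with two linear scans and then emits the output in one pass over a zip.
import Mathlib
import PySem

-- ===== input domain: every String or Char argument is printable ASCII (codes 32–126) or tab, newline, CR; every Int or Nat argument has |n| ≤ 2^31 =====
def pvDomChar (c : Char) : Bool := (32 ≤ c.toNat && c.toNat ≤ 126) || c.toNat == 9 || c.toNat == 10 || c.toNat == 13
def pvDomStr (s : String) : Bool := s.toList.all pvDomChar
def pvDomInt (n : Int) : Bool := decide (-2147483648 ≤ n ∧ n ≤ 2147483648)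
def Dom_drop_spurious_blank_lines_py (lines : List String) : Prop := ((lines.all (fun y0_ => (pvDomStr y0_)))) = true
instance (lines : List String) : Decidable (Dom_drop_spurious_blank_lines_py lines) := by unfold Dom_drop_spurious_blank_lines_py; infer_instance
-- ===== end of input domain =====

-- B replaces A's per-blank-line bidirectional neighbour rescans by two linear prev/next
-- non-blank precomputation passes and one output pass over the zipped lists (alternative
-- single-pass strategy; same value everywhere).

-- ===== PORT A =====

-- 'line.strip()' truthiness (shared by both Pythons)
def pyNonblank (s : String) : Bool := !(PySem.Str.strip s == "")

-- the while loop of _find_neighbor, ported with fuel = len(lines): with direction = ±1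
-- the loop makes at most len(lines) iterations before leaving the range
def find_neighbor_go (lines : List String) (idx direction : Int) : Nat → Option String
  | 0 => none
  | fuel + 1 =>
    if 0 ≤ idx ∧ idx < (lines.length : Int) then
      let candidate := (PySem.List.pyGet? lines idx).getD ""   -- in range here, so exact
      if pyNonblank candidate then some candidate
      else find_neighbor_go lines (idx + direction) direction fuel
    else none

def find_neighbor (lines : List String) (start direction : Int) : Option String :=
  find_neighbor_go lines (start + direction) direction lines.length

-- Python string truthiness of an Optional[str]: None and "" are falsy
def optTruthy (o : Option String) : Bool := !(o.getD "" == "")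

-- 'nxt.strip()[0].islower()'; the [] branch is unreachable (guarded by the preceding truthiness check)
def headIslower (s : String) : Bool :=
  match s.toList with
  | [] => false
  | c :: _ => PySem.Chars.islower c

-- A's big 'if' condition, in Python's order
def aCond (prev nxt : Option String) : Bool :=
  optTruthy prev && optTruthy nxt
  && !(PySem.Str.startswith (PySem.Str.strip (prev.getD "")) "#"
       || PySem.Str.startswith (PySem.Str.strip (prev.getD "")) "-"
       || PySem.Str.startswith (PySem.Str.strip (prev.getD "")) "###")
  && !(PySem.Str.startswith (PySem.Str.strip (nxt.getD "")) "#"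
       || PySem.Str.startswith (PySem.Str.strip (nxt.getD "")) "-")
  && !(PySem.Str.strip (nxt.getD "") == "")
  && headIslower (PySem.Str.strip (nxt.getD ""))

def drop_spurious_blank_lines_py (lines : List String) : List String :=
  (PySem.List.enumerate lines).foldl
    (fun compact p =>
      if pyNonblank p.2 then compact ++ [p.2]
      else
        let prev := find_neighbor lines p.1 (-1)
        let nxt := find_neighbor lines p.1 1
        if aCond prev nxt then compact
        else compact ++ [""]) []

-- ===== PORT B =====

-- forward scan: nearest non-blank line before each index ('last' accumulator)
def prevsAux (lines : List String) (last : Option String) : List (Option String) :=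
  match lines with
  | [] => []
  | l :: rest => last :: prevsAux rest (if pyNonblank l then some l else last)

-- backward scan: first component is the nearest non-blank at/after the head,
-- second is the list of nearest non-blank lines strictly after each index
def nextsAux (lines : List String) : Option String × List (Option String) :=
  match lines with
  | [] => (none, [])
  | l :: rest =>
      let r := nextsAux rest
      ((if pyNonblank l then some l else r.1), r.1 :: r.2)

-- B's drop condition on the precomputed neighbours
def bCond (p q : Option String) : Bool :=
  match p, q with
  | some p, some q =>
      !(PySem.Str.startswith (PySem.Str.strip p) "#"
        || PySem.Str.startswith (PySem.Str.strip p) "-")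
      && !(PySem.Str.startswith (PySem.Str.strip q) "#"
           || PySem.Str.startswith (PySem.Str.strip q) "-")
      && headIslower (PySem.Str.strip q)   -- q is non-blank by construction, so qs[0] exists
  | _, _ => false

def drop_spurious_blank_lines_py_alt (lines : List String) : List String :=
  let prevs := prevsAux lines none
  let nexts := (nextsAux lines).2
  (lines.zip (prevs.zip nexts)).foldl
    (fun out t =>
      if pyNonblank t.1 then out ++ [t.1]
      else if bCond t.2.1 t.2.2 then out
      else out ++ [""]) []

-- ===== PRECONDITION & SPEC =====
def Spec_drop_spurious_blank_lines_py (lines : List String) (out : List String) : Prop := out = drop_spurious_blank_lines_py_alt lines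
instance (lines : List String) (out : List String) : Decidable (Spec_drop_spurious_blank_lines_py lines out) := by unfold Spec_drop_spurious_blank_lines_py; infer_instance

-- ===== CLAIM (what is proved, stated in full; the proofs are below) =====
def Claim_equal_drop_spurious_blank_lines_py : Prop := ∀ (lines : List String), Dom_drop_spurious_blank_lines_py lines → Spec_drop_spurious_blank_lines_py lines (drop_spurious_blank_lines_py lines)

-- ===== LEMMAS AND PROOFS =====

-- last non-blank element of a prefix / first non-blank element of a suffix
def lastNB (xs : List String) : Option String := (xs.filter pyNonblank).getLast?
def firstNB (xs : List String) : Option String := xs.find? pyNonblank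

-- the common reference computation both ports are reduced to
def specGo (last : Option String) : List String → List String
  | [] => []
  | l :: rest =>
      (if pyNonblank l then [l]
       else if bCond last (firstNB rest) then [] else [""])
      ++ specGo (if pyNonblank l then some l else last) rest

theorem pyNonblank_ne_empty {s : String} (h : pyNonblank s = true) : s ≠ "" := by
  rintro rfl; revert h; decide

theorem lastNB_nonblank {xs : List String} {s : String} (h : lastNB xs = some s) :
    pyNonblank s = true := by
  have := List.mem_of_getLast? h
  exact (List.mem_filter.mp this).2

theorem firstNB_nonblank {xs : List String} {s : String} (h : firstNB xs = some s) :
    pyNonblank s = true := List.find?_some h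

theorem startswith_hash_of_hashes {s : String}
    (h : PySem.Str.startswith s "###" = true) : PySem.Str.startswith s "#" = true := by
  simp only [PySem.Str.startswith_eq] at h ⊢
  rw [PySem.Chars.startswith_iff] at h ⊢
  obtain ⟨t, ht⟩ := h
  exact ⟨'#' :: '#' :: t, by simpa using ht⟩

theorem aCond_eq_bCond {p q : Option String}
    (hp : ∀ s, p = some s → pyNonblank s = true)
    (hq : ∀ s, q = some s → pyNonblank s = true) :
    aCond p q = bCond p q := by
  cases p with
  | none => cases q <;> simp [aCond, bCond, optTruthy]
  | some a =>
    cases q with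
    | none => simp [aCond, bCond, optTruthy]
    | some b =>
      have ha := hp a rfl
      have hb := hq b rfl
      have ha' : (a == "") = false := beq_eq_false_iff_ne.mpr (pyNonblank_ne_empty ha)
      have hb' : (b == "") = false := beq_eq_false_iff_ne.mpr (pyNonblank_ne_empty hb)
      have hsb : (PySem.Str.strip b == "") = false := by
        unfold pyNonblank at hb; simpa using hb
      simp only [aCond, bCond, optTruthy, Option.getD_some, ha', hb', hsb]
      by_cases h1 : PySem.Str.startswith (PySem.Str.strip a) "#" = true
      · simp only [PySem.Str.startswith_eq, PySem.Str.toList_strip] at h1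
        simp only [show "#".toList = ['#'] from rfl] at h1
        simp [h1]
      · have h3 : PySem.Str.startswith (PySem.Str.strip a) "###" = false := by
          cases hh : PySem.Str.startswith (PySem.Str.strip a) "###"
          · rfl
          · exact absurd (startswith_hash_of_hashes hh) h1
        simp only [PySem.Str.startswith_eq, PySem.Str.toList_strip] at h1 h3
        simp only [show "#".toList = ['#'] from rfl, show "###".toList = ['#','#','#'] from rfl] at h1 h3
        simp [h1, h3]

set_option maxRecDepth 10000 in
-- find_neighbor, downward: the last non-blank line of the prefix before 'start'
theorem find_neighbor_go_down (lines : List String) :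
    ∀ (i : Nat) (fuel : Nat), i ≤ lines.length → i ≤ fuel →
      find_neighbor_go lines ((i : Int) - 1) (-1) fuel = lastNB (lines.take i) := by
  intro i
  induction i with
  | zero =>
    intro fuel _ _
    cases fuel <;> simp [find_neighbor_go, lastNB]
  | succ i ih =>
    intro fuel hlen hfuel
    obtain ⟨f, rfl⟩ : ∃ f, fuel = f + 1 := ⟨fuel - 1, by omega⟩
    have hi : i < lines.length := by omega
    have hidx : ((i + 1 : Nat) : Int) - 1 = (i : Int) := by push_cast; ring
    rw [hidx]
    rw [show find_neighbor_go lines (i : Int) (-1) (f + 1)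
          = if 0 ≤ (i : Int) ∧ (i : Int) < (lines.length : Int) then
              (if pyNonblank ((PySem.List.pyGet? lines (i : Int)).getD "")
               then some ((PySem.List.pyGet? lines (i : Int)).getD "")
               else find_neighbor_go lines ((i : Int) + (-1)) (-1) f)
            else none from rfl]
    rw [if_pos ⟨Int.natCast_nonneg i, by exact_mod_cast hi⟩]
    rw [PySem.List.pyGet?_natCast, List.getElem?_eq_getElem hi, Option.getD_some]
    have htake : lines.take (i + 1) = lines.take i ++ [lines[i]] := by
      rw [List.take_add_one, List.getElem?_eq_getElem hi]; simp
    by_cases h : pyNonblank lines[i] = true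
    · rw [if_pos h, htake]
      unfold lastNB
      rw [List.filter_append, show List.filter pyNonblank [lines[i]] = [lines[i]] from by
            simp [h]]
      exact List.getLast?_concat.symm
    · rw [if_neg (by simpa using h)]
      rw [show ((i : Int) + (-1)) = (i : Int) - 1 from by ring]
      rw [ih f (by omega) (by omega)]
      rw [htake]
      unfold lastNB
      rw [List.filter_append, show List.filter pyNonblank [lines[i]] = [] from by
            simp [h]]
      simp

-- find_neighbor, upward: the first non-blank line of the suffix from index i
theorem find_neighbor_go_up (lines : List String) :
    ∀ (fuel : Nat) (i : Nat), lines.length - i ≤ fuel →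
      find_neighbor_go lines (i : Int) 1 fuel = firstNB (lines.drop i) := by
  intro fuel
  induction fuel with
  | zero =>
    intro i hf
    rw [List.drop_eq_nil_of_le (by omega : lines.length ≤ i)]
    simp [find_neighbor_go, firstNB]
  | succ f ih =>
    intro i hf
    by_cases hi : i < lines.length
    · rw [show find_neighbor_go lines (i : Int) 1 (f + 1)
            = if 0 ≤ (i : Int) ∧ (i : Int) < (lines.length : Int) then
                (if pyNonblank ((PySem.List.pyGet? lines (i : Int)).getD "")
                 then some ((PySem.List.pyGet? lines (i : Int)).getD "")
                 else find_neighbor_go lines ((i : Int) + 1) 1 f)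
              else none from rfl]
      rw [if_pos ⟨Int.natCast_nonneg i, by exact_mod_cast hi⟩]
      rw [PySem.List.pyGet?_natCast, List.getElem?_eq_getElem hi, Option.getD_some]
      rw [List.drop_eq_getElem_cons hi]
      by_cases h : pyNonblank lines[i] = true
      · rw [if_pos h]
        unfold firstNB
        rw [List.find?_cons_of_pos h]
      · rw [if_neg (by simpa using h)]
        rw [show ((i : Int) + 1) = ((i + 1 : Nat) : Int) from by push_cast; ring]
        rw [ih (i + 1) (by omega)]
        unfold firstNB
        rw [List.find?_cons_of_neg (by simpa using h)]
    · rw [List.drop_eq_nil_of_le (by omega : lines.length ≤ i)]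
      rw [show find_neighbor_go lines (i : Int) 1 (f + 1)
            = if 0 ≤ (i : Int) ∧ (i : Int) < (lines.length : Int) then
                (if pyNonblank ((PySem.List.pyGet? lines (i : Int)).getD "")
                 then some ((PySem.List.pyGet? lines (i : Int)).getD "")
                 else find_neighbor_go lines ((i : Int) + 1) 1 f)
              else none from rfl]
      rw [if_neg (by omega)]
      simp [firstNB]

theorem nextsAux_fst (lines : List String) : (nextsAux lines).1 = firstNB lines := by
  induction lines with
  | nil => rfl
  | cons l rest ih =>
    by_cases h : pyNonblank l = true
    · simp [nextsAux, firstNB, List.find?_cons_of_pos h, h]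
    · simp only [nextsAux, if_neg (by simpa using h : ¬ pyNonblank l = true), ih, firstNB]
      rw [List.find?_cons_of_neg (by simpa using h)]

theorem specGo_cons (last : Option String) (l : String) (rest : List String) :
    specGo last (l :: rest)
      = (if pyNonblank l then [l] else if bCond last (firstNB rest) then [] else [""])
        ++ specGo (if pyNonblank l then some l else last) rest := rfl

-- A's per-element contribution
def gA (lines : List String) (p : Int × String) : List String :=
  if pyNonblank p.2 then [p.2]
  else if aCond (find_neighbor lines p.1 (-1)) (find_neighbor lines p.1 1) then []
  else [""]

theorem A_eq_specGo (pre suf : List String) :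
    (PySem.List.enumerate suf (pre.length : Int)).flatMap (gA (pre ++ suf))
      = specGo (lastNB pre) suf := by
  induction suf generalizing pre with
  | nil => simp [PySem.List.enumerate_nil, specGo]
  | cons l rest ih =>
    rw [PySem.List.enumerate_cons, List.flatMap_cons]
    have hfull : pre ++ l :: rest = (pre ++ [l]) ++ rest := by simp
    have hprev : find_neighbor (pre ++ l :: rest) (pre.length : Int) (-1) = lastNB pre := by
      unfold find_neighbor
      rw [show (pre.length : Int) + (-1) = (pre.length : Int) - 1 from by ring]
      rw [find_neighbor_go_down (pre ++ l :: rest) pre.length _ (by simp) (by simp)]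
      rw [List.take_left]
    have hnxt : find_neighbor (pre ++ l :: rest) (pre.length : Int) 1 = firstNB rest := by
      unfold find_neighbor
      rw [show (pre.length : Int) + 1 = ((pre.length + 1 : Nat) : Int) from by push_cast; ring]
      rw [find_neighbor_go_up (pre ++ l :: rest) _ (pre.length + 1) (by simp)]
      congr 1
      rw [hfull]
      exact List.drop_left' (by simp)
    have hlast : lastNB (pre ++ [l]) = if pyNonblank l = true then some l else lastNB pre := by
      unfold lastNB
      rw [List.filter_append]
      by_cases h : pyNonblank l = true
      · simp [h]
      · simp [h]
    have htail : (PySem.List.enumerate rest ((pre.length : Int) + 1)).flatMap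
          (gA (pre ++ l :: rest))
        = specGo (lastNB (pre ++ [l])) rest := by
      have := ih (pre ++ [l])
      rw [hfull]
      simpa using this
    by_cases h : pyNonblank l = true
    · rw [show gA (pre ++ l :: rest) ((pre.length : Int), l) = [l] from by simp [gA, h]]
      rw [htail, hlast, if_pos h, specGo_cons, if_pos h, if_pos h]
    · rw [show gA (pre ++ l :: rest) ((pre.length : Int), l)
            = if bCond (lastNB pre) (firstNB rest) then [] else [""] from by
          simp only [gA, if_neg (by simpa using h : ¬ pyNonblank l = true), hprev, hnxt]
          rw [aCond_eq_bCond (fun s hs => lastNB_nonblank hs) (fun s hs => firstNB_nonblank hs)]]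
      rw [htail, hlast, if_neg (by simpa using h : ¬ pyNonblank l = true), specGo_cons,
          if_neg (by simpa using h : ¬ pyNonblank l = true),
          if_neg (by simpa using h : ¬ pyNonblank l = true)]

theorem B_eq_specGo (lines : List String) (last : Option String) :
    (lines.zip ((prevsAux lines last).zip (nextsAux lines).2)).flatMap
        (fun t => if pyNonblank t.1 then [t.1] else if bCond t.2.1 t.2.2 then [] else [""])
      = specGo last lines := by
  induction lines generalizing last with
  | nil => simp [prevsAux, nextsAux, specGo]
  | cons l rest ih =>
    simp only [prevsAux, nextsAux, nextsAux_fst, List.zip_cons_cons, List.flatMap_cons]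
    rw [ih, specGo_cons]

-- ===== VERDICT (by name: the statement is the Claim_ definition above) =====
theorem drop_spurious_blank_lines_py_spec : Claim_equal_drop_spurious_blank_lines_py := by
  intro lines _
  show drop_spurious_blank_lines_py lines = drop_spurious_blank_lines_py_alt lines
  calc drop_spurious_blank_lines_py lines
      = (PySem.List.enumerate lines 0).flatMap (gA lines) := by
        unfold drop_spurious_blank_lines_py
        rw [show (fun (compact : List String) (p : Int × String) =>
              if pyNonblank p.2 then compact ++ [p.2]
              else
                let prev := find_neighbor lines p.1 (-1)
                let nxt := find_neighbor lines p.1 1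
                if aCond prev nxt then compact else compact ++ [""])
            = (fun (compact : List String) (p : Int × String) => compact ++ gA lines p) from by
          funext c p
          simp only [gA]
          split_ifs <;> simp]
        rw [PySem.List.foldl_append_eq_flatMap]
        simp
    _ = specGo none lines := by
        have h := A_eq_specGo [] lines
        simpa using h
    _ = drop_spurious_blank_lines_py_alt lines := by
        unfold drop_spurious_blank_lines_py_alt
        rw [show (fun (out : List String) (t : String × Option String × Option String) =>
              if pyNonblank t.1 then out ++ [t.1]
              else if bCond t.2.1 t.2.2 then out else out ++ [""])
            = (fun (out : List String) (t : String × Option String × Option String) =>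
                out ++ (if pyNonblank t.1 then [t.1]
                        else if bCond t.2.1 t.2.2 then [] else [""])) from by
          funext o t
          split_ifs <;> simp]
        rw [PySem.List.foldl_append_eq_flatMap]
        rw [B_eq_specGo lines none]
        simp
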